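-- pv_equiv track=rewrite | github.com/AdityaD16/Quantum-Circuit-Simulator-DMRG | src/simulation.py | partition_into_k_parts
-- ===== SOURCE A (Python) =====
-- def partition_into_k_parts(lst, k):
--     """
--     Utility to partition a list into k roughly equal-sized sublists.
--
--     Args:
--         lst (list): The list to partition.
--         k (int): The number of partitions.
--
--     Returns:
--         list: A list of k sublists.
--     """
--     avg = len(lst) // k
--     remainder = len(lst) % k
--     result = []
--     start = 0
--     for i in range(k):
--         end = start + avg + (1 if i < remainder else 0)
--         result.append(lst[start:end])
--         start = end
--     return result
-- ===== SOURCE B (Python) =====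
-- def partition_into_k_parts(lst, k):
--     n = len(lst)
--     avg, rem = divmod(n, k)
--     cut = rem * (avg + 1)
--     parts = [[] for _ in range(k)]
--     for j, x in enumerate(lst):
--         p = j // (avg + 1) if j < cut else rem + (j - cut) // avg
--         parts[p].append(x)
--     return parts
-- ===== Notes on version B (the rewrite author's own statement) =====
-- stated objective: alternative
-- what changed: Instead of slicing out k contiguous parts with a running start, B pre-allocates k empty buckets and makes a single pass over the elements, computing each element's bucket index in closed form (j//(avg+1) for the first rem*(avg+1) positions, else rem+(j-cut)//avg) and appending it there.
-- outside the precondition, e.g. on partition_into_k_parts([1], 0): A raises ZeroDivisionError, B raises ZeroDivisionError; on partition_into_k_parts([1], -1): A returns [], B raises IndexError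
import Mathlib
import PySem

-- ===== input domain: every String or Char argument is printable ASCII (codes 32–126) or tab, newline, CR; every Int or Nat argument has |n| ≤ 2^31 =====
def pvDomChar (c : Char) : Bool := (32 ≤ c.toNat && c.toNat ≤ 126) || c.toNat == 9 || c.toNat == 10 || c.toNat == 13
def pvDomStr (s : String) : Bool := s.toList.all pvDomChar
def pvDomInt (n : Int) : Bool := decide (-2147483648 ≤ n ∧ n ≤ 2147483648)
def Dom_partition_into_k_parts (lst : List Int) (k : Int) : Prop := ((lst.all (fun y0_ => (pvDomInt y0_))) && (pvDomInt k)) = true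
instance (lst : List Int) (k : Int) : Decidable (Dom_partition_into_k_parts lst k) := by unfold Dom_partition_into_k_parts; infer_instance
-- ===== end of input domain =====

-- B distributes the elements one by one into k pre-allocated buckets via a closed-form
-- bucket index per element, instead of A's slice-per-part loop with a running start;
-- objective: alternative. Pre_ restricts to k ≥ 1 (A raises ZeroDivisionError at k = 0;
-- negative k is outside the natural domain of a partition count).

-- ===== PORT A =====
def partition_into_k_parts (lst : List Int) (k : Int) : List (List Int) :=
  let avg := PySem.Int.floordiv (lst.length : Int) k
  let rem := PySem.Int.mod (lst.length : Int) k
  ((PySem.List.pyRange 0 k 1).foldl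
    (fun (st : List (List Int) × Int) i =>
      let e := st.2 + avg + (if i < rem then 1 else 0)
      (st.1 ++ [PySem.List.slice lst (some st.2) (some e)], e))
    ([], 0)).1

-- ===== PORT B =====
-- parts[p].append(x) is List.modify at p.toNat: for k ≥ 1 the computed bucket index p is
-- always ≥ 0 and < k, so toNat-indexing here is exact on the inputs admitted by Pre_.
def partition_into_k_parts_alt (lst : List Int) (k : Int) : List (List Int) :=
  let avg := PySem.Int.floordiv (lst.length : Int) k
  let rem := PySem.Int.mod (lst.length : Int) k
  let cut := rem * (avg + 1)
  let parts := (PySem.List.pyRange 0 k 1).map (fun _ => ([] : List Int))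
  (PySem.List.enumerate lst 0).foldl
    (fun parts jx =>
      let p : Int := if jx.1 < cut then PySem.Int.floordiv jx.1 (avg + 1)
                     else rem + PySem.Int.floordiv (jx.1 - cut) avg
      parts.modify p.toNat (fun part => part ++ [jx.2]))
    parts

-- ===== PRECONDITION & SPEC =====
-- Pre_ admits exactly k ≥ 1: at k = 0 Python A raises ZeroDivisionError; for k < 0 (not a
-- meaningful partition count) A happens to return [] via an empty range while B raises.
def Pre_partition_into_k_parts (lst : List Int) (k : Int) : Prop := 1 ≤ k
instance (lst : List Int) (k : Int) : Decidable (Pre_partition_into_k_parts lst k) := by unfold Pre_partition_into_k_parts; infer_instance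
def pvWitness_partition_into_k_parts : List Int × Int := ([1, 2, 3, 4, 5], 2)

def Spec_partition_into_k_parts (lst : List Int) (k : Int) (out : List (List Int)) : Prop := out = partition_into_k_parts_alt lst k
instance (lst : List Int) (k : Int) (out : List (List Int)) : Decidable (Spec_partition_into_k_parts lst k out) := by unfold Spec_partition_into_k_parts; infer_instance

-- ===== CLAIM (what is proved, stated in full; the proofs are below) =====
def Claim_equal_partition_into_k_parts : Prop := ∀ (lst : List Int) (k : Int), Dom_partition_into_k_parts lst k → Pre_partition_into_k_parts lst k → Spec_partition_into_k_parts lst k (partition_into_k_parts lst k)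

-- ===== LEMMAS AND PROOFS =====

-- Closed-form boundary of part i: the first i parts hold i*avg + min i rem elements.
def pvS (avg rem i : Nat) : Nat := i * avg + min i rem

-- Common normal form: part i is the slice [pvS i, pvS (i+1)) of lst.
def pvF (lst : List Int) (avg rem K : Nat) : List (List Int) :=
  (List.range K).map (fun i => (lst.drop (pvS avg rem i)).take (pvS avg rem (i+1) - pvS avg rem i))

-- Bucket index of element j, as B computes it (Nat form).
def pvP (avg rem j : Nat) : Nat :=
  if j < rem * (avg + 1) then j / (avg + 1) else rem + (j - rem * (avg + 1)) / avg

lemma pvS_le (avg rem : Nat) {i j : Nat} (h : i ≤ j) : pvS avg rem i ≤ pvS avg rem j :=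
  Nat.add_le_add (Nat.mul_le_mul_right _ h) (min_le_min h le_rfl)

lemma pvS_top (avg rem K : Nat) (hrem : rem < K) (hN : avg * K + rem = N) :
    pvS avg rem K = N := by
  unfold pvS
  rw [min_eq_right (le_of_lt hrem), Nat.mul_comm]
  exact hN

-- The bucket of element j < N is exactly the part whose slice contains position j.
lemma pvP_spec (avg rem K N j : Nat) (hrem : rem < K) (hN : avg * K + rem = N) (hj : j < N) :
    pvP avg rem j < K ∧ pvS avg rem (pvP avg rem j) ≤ j ∧ j < pvS avg rem (pvP avg rem j + 1) := by
  unfold pvP pvS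
  by_cases hc : j < rem * (avg + 1)
  · rw [if_pos hc]
    set q := j / (avg + 1) with hq
    have hdm : (avg + 1) * q + j % (avg + 1) = j := Nat.div_add_mod j (avg + 1)
    have hmod : j % (avg + 1) < avg + 1 := Nat.mod_lt _ (Nat.succ_pos _)
    have hqrem : q < rem := by
      rw [hq]
      exact (Nat.div_lt_iff_lt_mul (Nat.succ_pos avg)).mpr (by omega)
    rw [min_eq_left (le_of_lt hqrem), min_eq_left hqrem]
    obtain ⟨X, hX⟩ : ∃ t, t = (avg + 1) * q := ⟨_, rfl⟩
    have e1 : q * avg + q = X := by rw [hX]; ring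
    have e2 : (q + 1) * avg + (q + 1) = X + avg + 1 := by rw [hX]; ring
    omega
  · rw [if_neg hc]
    have hc' : rem * (avg + 1) ≤ j := Nat.le_of_not_lt hc
    have havg : 0 < avg := by
      by_contra hcon
      have h0 : avg = 0 := by omega
      subst h0
      simp only [Nat.zero_mul, Nat.zero_add] at hN
      omega
    set q := (j - rem * (avg + 1)) / avg with hq
    have hdm : avg * q + (j - rem * (avg + 1)) % avg = j - rem * (avg + 1) :=
      Nat.div_add_mod _ avg
    have hmod : (j - rem * (avg + 1)) % avg < avg := Nat.mod_lt _ havg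
    have e1 : rem * (avg + 1) = rem * avg + rem := by ring
    have e2 : avg * K = K * avg := Nat.mul_comm _ _
    have hqK : rem + q < K := by
      by_contra hcon
      have h1 : K - rem ≤ q := by omega
      have h2 : (K - rem) * avg ≤ q * avg := Nat.mul_le_mul_right _ h1
      have h3 : (K - rem) * avg = K * avg - rem * avg := Nat.sub_mul _ _ _
      have h4 : q * avg = avg * q := Nat.mul_comm _ _
      have h5 : rem * avg ≤ K * avg := Nat.mul_le_mul_right _ (le_of_lt hrem)
      omega
    rw [min_eq_right (Nat.le_add_right rem q),
      min_eq_right ((Nat.le_add_right rem q).trans (Nat.le_succ _))]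
    have g2 : (rem + q) * avg = rem * avg + avg * q := by ring
    have g3 : (rem + q + 1) * avg = rem * avg + avg * q + avg := by ring
    omega

-- A's loop invariant (running start = closed-form boundary), unchanged from the slice view.
lemma partition_foldl_invariant (lst : List Int) (avg rem : Int) (hrem : 0 ≤ rem) (n : Nat) :
    ((PySem.List.pyRange 0 (n : Int) 1).foldl
      (fun (st : List (List Int) × Int) i =>
        let e := st.2 + avg + (if i < rem then 1 else 0)
        (st.1 ++ [PySem.List.slice lst (some st.2) (some e)], e))
      ([], 0))
    = ((PySem.List.pyRange 0 (n : Int) 1).map (fun i =>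
        PySem.List.slice lst (some (i * avg + min i rem)) (some ((i + 1) * avg + min (i + 1) rem))),
       (n : Int) * avg + min (n : Int) rem) := by
  induction n with
  | zero => simp [PySem.List.pyRange_one_eq_nil]; omega
  | succ m ih =>
    have hcast : ((m + 1 : Nat) : Int) = (m : Int) + 1 := by push_cast; ring
    rw [hcast, PySem.List.pyRange_one_succ_right (by positivity)]
    rw [List.foldl_append, List.map_append, ih]
    simp only [List.foldl_cons, List.foldl_nil, List.map_cons, List.map_nil]
    have h1 : (m : Int) * avg + min (m : Int) rem + avg + (if (m : Int) < rem then 1 else 0)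
        = ((m : Int) + 1) * avg + min ((m : Int) + 1) rem := by
      have hm : ((m : Int) + 1) * avg = (m : Int) * avg + avg := by ring
      rw [hm]; split_ifs with h <;> omega
    rw [h1]

-- A equals the common normal form.
lemma A_eq_pvF (lst : List Int) (K : Nat) :
    partition_into_k_parts lst (K : Int) = pvF lst (lst.length / K) (lst.length % K) K := by
  unfold partition_into_k_parts pvF
  simp only [PySem.Int.floordiv_natCast, PySem.Int.mod_natCast]
  rw [partition_foldl_invariant lst _ _ (by positivity) K]
  rw [PySem.List.pyRange_one, List.map_map]
  simp only [Int.sub_zero, Int.toNat_natCast]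
  refine List.map_congr_left (fun i _ => ?_)
  simp only [Function.comp_apply, Int.zero_add]
  have c1 : (i : Int) * ((lst.length / K : Nat) : Int) + min (i : Int) ((lst.length % K : Nat) : Int)
      = ((pvS (lst.length / K) (lst.length % K) i : Nat) : Int) := by
    unfold pvS; push_cast; ring_nf
  have c2 : ((i : Int) + 1) * ((lst.length / K : Nat) : Int) + min ((i : Int) + 1) ((lst.length % K : Nat) : Int)
      = ((pvS (lst.length / K) (lst.length % K) (i + 1) : Nat) : Int) := by
    unfold pvS; push_cast; ring_nf
  rw [c1, c2, PySem.List.slice_natCast]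

-- B's fold invariant: after the first m elements, bucket i holds positions [pvS i, min m (pvS (i+1))).
lemma pvFold (lst : List Int) (avg rem K : Nat)
    (step : List (List Int) → Int × Int → List (List Int))
    (hstep : ∀ parts (j : Nat) (x : Int),
      step parts ((j : Int), x) = parts.modify (pvP avg rem j) (fun part => part ++ [x]))
    (hrem : rem < K) (hN : avg * K + rem = lst.length)
    (m : Nat) (hm : m ≤ lst.length) :
    (PySem.List.enumerate (lst.take m) 0).foldl step
        ((List.range K).map (fun _ => ([] : List Int)))
    = (List.range K).map
        (fun i => (lst.drop (pvS avg rem i)).take (min m (pvS avg rem (i+1)) - pvS avg rem i)) := by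
  induction m with
  | zero => simp
  | succ m ih =>
    have hlt : m < lst.length := by omega
    rw [List.take_add_one, List.getElem?_eq_getElem hlt]
    rw [PySem.List.enumerate_append, List.foldl_append, ih (by omega)]
    simp only [Option.toList_some, PySem.List.enumerate_cons, PySem.List.enumerate_nil,
      List.length_take, List.foldl_cons, List.foldl_nil]
    have hstart : (0 : Int) + (min m lst.length : Nat) = (m : Int) := by
      rw [min_eq_left (le_of_lt hlt)]; ring
    rw [hstart, hstep]
    obtain ⟨hpK, hp1, hp2⟩ := pvP_spec avg rem K lst.length m hrem hN hlt
    set p := pvP avg rem m with hp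
    refine List.ext_getElem (by simp) (fun i hi1 hi2 => ?_)
    have hiK : i < K := by simpa using hi2
    rw [List.getElem_modify]
    simp only [List.getElem_map, List.getElem_range]
    by_cases hip : p = i
    · subst hip
      rw [if_pos rfl]
      rw [min_eq_left (le_of_lt hp2), min_eq_left hp2]
      have e : m + 1 - pvS avg rem p = (m - pvS avg rem p) + 1 := by omega
      rw [e, List.take_add_one, List.getElem?_drop]
      have e2 : pvS avg rem p + (m - pvS avg rem p) = m := by omega
      rw [e2, List.getElem?_eq_getElem hlt]
      simp
    · rw [if_neg hip]
      have : min m (pvS avg rem (i+1)) - pvS avg rem i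
           = min (m+1) (pvS avg rem (i+1)) - pvS avg rem i := by
        rcases Nat.lt_or_ge i p with hlt' | hge
        · have h1 : pvS avg rem (i+1) ≤ pvS avg rem p := pvS_le avg rem hlt'
          omega
        · have hgt : p < i := by omega
          have h2 : pvS avg rem (p+1) ≤ pvS avg rem i := pvS_le avg rem hgt
          omega
      rw [this]

-- B equals the common normal form.
lemma B_eq_pvF (lst : List Int) (K : Nat) (hK : 0 < K) :
    partition_into_k_parts_alt lst (K : Int) = pvF lst (lst.length / K) (lst.length % K) K := by
  unfold partition_into_k_parts_alt
  simp only [PySem.Int.floordiv_natCast, PySem.Int.mod_natCast]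
  set avg := lst.length / K with havg
  set rem := lst.length % K with hrem'
  have hrem : rem < K := Nat.mod_lt _ hK
  have hN : avg * K + rem = lst.length := by
    rw [havg, hrem', Nat.mul_comm]; exact Nat.div_add_mod _ _
  have hinit : (PySem.List.pyRange 0 (K : Int) 1).map (fun _ => ([] : List Int))
      = (List.range K).map (fun _ => ([] : List Int)) := by
    rw [PySem.List.pyRange_one]
    simp [List.map_map, Function.comp_def]
  rw [hinit]
  have hen : PySem.List.enumerate lst 0 = PySem.List.enumerate (lst.take lst.length) 0 := by
    rw [List.take_length]
  rw [hen]
  refine Eq.trans (pvFold lst avg rem K _ ?_ hrem hN lst.length le_rfl) ?_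
  case refine_2 =>
    unfold pvF
    refine List.map_congr_left (fun i hi => ?_)
    have hiK : i < K := List.mem_range.mp hi
    have : pvS avg rem (i+1) ≤ lst.length := by
      rw [← pvS_top avg rem K hrem hN]
      exact pvS_le avg rem hiK
    rw [min_eq_right this]
  case refine_1 =>
    -- the step function computes the Nat bucket index
    intro parts j x
    dsimp only
    congr 1
    rw [show (rem : Int) * ((avg : Int) + 1) = ((rem * (avg + 1) : Nat) : Int) by push_cast; ring]
    rw [show ((avg : Int) + 1) = ((avg + 1 : Nat) : Int) by push_cast; ring]
    unfold pvP
    by_cases hj : j < rem * (avg + 1)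
    · rw [if_pos (by exact_mod_cast hj), if_pos hj, PySem.Int.floordiv_natCast, Int.toNat_natCast]
    · have hj' : rem * (avg + 1) ≤ j := Nat.le_of_not_lt hj
      rw [if_neg (by exact_mod_cast hj), if_neg hj]
      rw [show (j : Int) - ((rem * (avg + 1) : Nat) : Int) = ((j - rem * (avg + 1) : Nat) : Int) by
        push_cast [hj']; ring]
      rw [PySem.Int.floordiv_natCast, ← Nat.cast_add, Int.toNat_natCast]

-- ===== VERDICT (by name: the statement is the Claim_ definition above) =====
theorem partition_into_k_parts_spec : Claim_equal_partition_into_k_parts := by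
  intro lst k _ hk
  unfold Pre_partition_into_k_parts at hk
  unfold Spec_partition_into_k_parts
  obtain ⟨K, rfl⟩ : ∃ K : Nat, k = (K : Int) := ⟨k.toNat, by omega⟩
  have hKpos : 0 < K := by exact_mod_cast hk
  rw [A_eq_pvF, B_eq_pvF lst K hKpos]
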